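-- pv_equiv track=rewrite | github.com/isudox/nerd-algo | python-algorithm/leetcode/problem_1461.py | hasAllCodes
-- ===== SOURCE A (Python) =====
-- def hasAllCodes(s: str, k: int) -> bool:
--     if k > len(s):
--         return False
--     n = 2 ** k
--     seen = [False] * n
--     num = 0
--     for i in range(k):
--         num = (num << 1) + int(s[i])
--     seen[num] = True
--     for i in range(1, len(s) - k + 1):
--         num = num & (((1 << k) - 1) - (1 << (k - 1)))
--         num = (num << 1) + int(s[i + k - 1])
--         seen[num] = True
--     for v in seen:
--         if not v:
--             return False
--     return True
-- ===== SOURCE B (Python) =====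
-- def hasAllCodes(s: str, k: int) -> bool:
--     if k > len(s):
--         return False
--     codes = set()
--     for i in range(len(s) - k + 1):
--         code = 0
--         for c in s[i:i+k]:
--             code = 2 * code + int(c)
--         codes.add(code)
--     return len(codes) == 2 ** k
-- ===== Notes on version B (the rewrite author's own statement) =====
-- stated objective: alternative
-- what changed: Maintains a set of the k-length window codes, each recomputed directly from its window's digits, and compares the set's size with 2**k, instead of rolling one bit-masked integer along the string and scanning a boolean array of size 2**k; Pre_ keeps k >= 1 with s over the 0/1 alphabet (plus the trivial k > len(s) and k = 0 on empty s cases), excluding the inputs where A raises and the non-binary digit strings outside the problem's alphabet on which the two readings of a 'code' need not agree.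
-- outside the precondition, e.g. on hasAllCodes('0011020', 2): A returns True, B returns False
import Mathlib
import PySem

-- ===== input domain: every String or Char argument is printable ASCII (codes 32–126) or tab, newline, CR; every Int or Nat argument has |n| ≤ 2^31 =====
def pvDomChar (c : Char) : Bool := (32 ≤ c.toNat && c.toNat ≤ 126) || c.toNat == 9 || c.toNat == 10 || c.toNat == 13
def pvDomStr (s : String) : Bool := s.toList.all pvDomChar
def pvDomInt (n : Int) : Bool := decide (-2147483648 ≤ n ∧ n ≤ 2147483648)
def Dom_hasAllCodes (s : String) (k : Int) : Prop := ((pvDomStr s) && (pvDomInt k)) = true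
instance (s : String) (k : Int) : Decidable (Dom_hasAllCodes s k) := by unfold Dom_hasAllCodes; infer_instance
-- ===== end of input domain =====

-- B replaces A's rolling bit-integer + boolean-array scheme with a set of per-window codes
-- compared against 2**k (alternative decomposition; equivalence on Pre_'s binary-string domain).

-- ===== PORT A =====
-- int(s[i]) for a single character; exact on Pre_'s domain, where every character is '0' or '1'
-- (so every Python int in A is ≥ 0 and Nat is exact here; `2 * num` renders `num << 1`, and the
-- getD index is in range on Pre_, where Python's s[i] never raises).
def pvDigit (c : Char) : Nat := c.toNat - 48

def hasAllCodes (s : String) (k : Int) : Bool :=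
  let cs := s.toList
  if k > (cs.length : Int) then false
  else
    let kn := k.toNat                      -- on Pre_, k ≥ 0 here
    let n := 2 ^ kn                        -- n = 2 ** k
    let seen := List.replicate n false     -- seen = [False] * n
    -- for i in range(k): num = (num << 1) + int(s[i])
    let num := (List.range kn).foldl (fun num i => 2 * num + pvDigit (cs.getD i 'x')) 0
    let seen := seen.set num true          -- seen[num] = True
    -- for i in range(1, len(s) - k + 1): …   (loop counter j = i - 1)
    let st := (List.range (cs.length - kn)).foldl
      (fun (st : Nat × List Bool) j =>
        let i := j + 1
        let num := st.1 &&& ((2 ^ kn - 1) - 2 ^ (kn - 1))   -- num & (((1<<k)-1) - (1<<(k-1)))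
        let num := 2 * num + pvDigit (cs.getD (i + kn - 1) 'x')
        (num, st.2.set num true))
      (num, seen)
    -- for v in seen: if not v: return False / return True
    st.2.all (fun v => v)

-- ===== PORT B =====
-- int(c) for a single character; exact on Pre_'s domain, where every character is '0' or '1'
def pvDigitI (c : Char) : Int := (c.toNat : Int) - 48

def hasAllCodes_alt (s : String) (k : Int) : Bool :=
  let cs := s.toList
  if k > (cs.length : Int) then false
  else
    -- codes = set()
    -- for i in range(len(s) - k + 1): code = 0; for c in s[i:i+k]: code = 2*code + int(c); codes.add(code)
    let codes := (List.range ((cs.length : Int) - k + 1).toNat).foldl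
      (fun codes (i : Nat) =>
        PySem.Set.add codes
          ((PySem.List.slice cs (some (i : Int)) (some ((i : Int) + k))).foldl
            (fun code c => 2 * code + pvDigitI c) 0))
      PySem.Set.empty
    -- return len(codes) == 2 ** k; for k < 0 Python's 2**k is a fractional float,
    -- never equal to the integer len(codes)
    if k < 0 then false else (codes.length : Int) == 2 ^ k.toNat

-- ===== PRECONDITION & SPEC =====
-- Pre_ excludes the inputs where A raises (k < 0, k = 0 with non-empty s, any non-digit character
-- reached by the scan, digit strings whose code overflows A's seen array) and the remaining
-- non-binary digit strings, outside the problem's 0/1 alphabet, where A's masked rolling value and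
-- B's per-window code are each defensible but need not agree (e.g. ('0011020', 2): A returns True,
-- B returns False; B itself raises on non-digit characters there).
def Pre_hasAllCodes (s : String) (k : Int) : Prop :=
  (s.toList.length : Int) < k ∨
  (1 ≤ k ∧ s.toList.all (fun c => c == '0' || c == '1') = true) ∨
  (k = 0 ∧ s = "")
instance (s : String) (k : Int) : Decidable (Pre_hasAllCodes s k) := by
  unfold Pre_hasAllCodes; infer_instance

def pvWitness_hasAllCodes : String × Int := ("0110", 1)

def Spec_hasAllCodes (s : String) (k : Int) (out : Bool) : Prop := out = hasAllCodes_alt s k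
instance (s : String) (k : Int) (out : Bool) : Decidable (Spec_hasAllCodes s k out) := by
  unfold Spec_hasAllCodes; infer_instance

-- ===== CLAIM (what is proved, stated in full; the proofs are below) =====
def Claim_equal_hasAllCodes : Prop := ∀ (s : String) (k : Int), Dom_hasAllCodes s k →
  Pre_hasAllCodes s k → Spec_hasAllCodes s k (hasAllCodes s k)

-- ===== LEMMAS AND PROOFS =====

-- value of a binary word, most significant digit first
def pvVal (w : List Char) : Nat := w.foldl (fun a c => 2 * a + pvDigit c) 0

def pvBin (w : List Char) : Prop := ∀ c ∈ w, c = '0' ∨ c = '1'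

-- the i-th window of length kn
def pvWin (cs : List Char) (kn i : Nat) : List Char := (cs.drop i).take kn

lemma pvVal_foldl (w : List Char) (a : Nat) :
    w.foldl (fun a c => 2 * a + pvDigit c) a = a * 2 ^ w.length + pvVal w := by
  induction w generalizing a with
  | nil => simp [pvVal]
  | cons c t ih =>
    simp only [List.foldl_cons, List.length_cons]
    rw [ih, show pvVal (c :: t) = t.foldl (fun a c => 2 * a + pvDigit c) (pvDigit c) from by
      simp [pvVal], ih]
    ring

lemma pvVal_cons (c : Char) (w : List Char) :
    pvVal (c :: w) = pvDigit c * 2 ^ w.length + pvVal w := by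
  have : pvVal (c :: w) = w.foldl (fun a c => 2 * a + pvDigit c) (pvDigit c) := by simp [pvVal]
  rw [this, pvVal_foldl]

lemma pvVal_append_singleton (w : List Char) (c : Char) :
    pvVal (w ++ [c]) = 2 * pvVal w + pvDigit c := by
  simp [pvVal, List.foldl_append]

lemma pvDigit_le_one {c : Char} (h : c = '0' ∨ c = '1') : pvDigit c ≤ 1 := by
  rcases h with h | h <;> subst h <;> decide

lemma pvVal_lt {w : List Char} (hb : pvBin w) : pvVal w < 2 ^ w.length := by
  induction w with
  | nil => simp [pvVal]
  | cons c t ih =>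
    have hc : pvDigit c ≤ 1 := pvDigit_le_one (hb c (by simp))
    have ht : pvVal t < 2 ^ t.length := ih (fun x hx => hb x (by simp [hx]))
    rw [pvVal_cons]
    have h2 : 2 ^ (t.length + 1) = 2 * 2 ^ t.length := by rw [pow_succ]; ring
    simp only [List.length_cons, h2]
    nlinarith
-- first loop of A computes the value of the first window
lemma pvFirst (cs : List Char) (m : Nat) (hm : m ≤ cs.length) :
    (List.range m).foldl (fun num i => 2 * num + pvDigit (cs.getD i 'x')) 0
      = pvVal (cs.take m) := by
  induction m with
  | zero => simp [pvVal]
  | succ m ih =>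
    rw [List.range_succ, List.foldl_append, ih (by omega)]
    have hlt : m < cs.length := by omega
    have htk : cs.take (m + 1) = cs.take m ++ [cs[m]] := by
      rw [List.take_add_one]; simp [List.getElem?_eq_getElem hlt]
    have hgd : cs.getD m 'x' = cs[m] := by simp [List.getD, List.getElem?_eq_getElem hlt]
    rw [htk, pvVal_append_singleton]
    simp [List.getD, List.getElem?_eq_getElem hlt]

-- mask arithmetic: (2^kn - 1) - 2^(kn-1) = 2^(kn-1) - 1 for kn ≥ 1
lemma pvMask (kn : Nat) (h : 1 ≤ kn) : (2 ^ kn - 1) - 2 ^ (kn - 1) = 2 ^ (kn - 1) - 1 := by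
  have h2 : 2 ^ kn = 2 * 2 ^ (kn - 1) := by
    rw [← pow_succ']
    congr 1
    omega
  omega

lemma pvWin_len (cs : List Char) (kn i : Nat) (h : i + kn ≤ cs.length) :
    (pvWin cs kn i).length = kn := by
  simp [pvWin]
  omega

lemma pvWin_bin (cs : List Char) (kn i : Nat) (hb : pvBin cs) : pvBin (pvWin cs kn i) := by
  intro c hc
  exact hb c (List.mem_of_mem_drop (List.mem_of_mem_take hc))

-- rolling step: masking and appending the next digit yields the next window's value
lemma pvRoll (cs : List Char) (kn j : Nat) (hb : pvBin cs) (hk : 1 ≤ kn)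
    (hj : j + kn < cs.length) :
    2 * (pvVal (pvWin cs kn j) &&& (2 ^ (kn - 1) - 1)) + pvDigit (cs.getD (j + kn) 'x')
      = pvVal (pvWin cs kn (j + 1)) := by
  obtain ⟨m, rfl⟩ : ∃ m, kn = m + 1 := ⟨kn - 1, by omega⟩
  simp only [Nat.add_sub_cancel]
  set mid := (cs.drop (j + 1)).take m with hmid
  have hjl : j < cs.length := by omega
  have hidx : j + 1 + m < cs.length := by omega
  have hmidlen : mid.length = m := by
    simp [hmid]
    omega
  have hmidbin : pvBin mid := pvWin_bin cs m (j + 1) hb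
  have hwj : pvWin cs (m + 1) j = cs[j] :: mid := by
    rw [pvWin, List.drop_eq_getElem_cons hjl, List.take_succ_cons]
  have hwj1 : pvWin cs (m + 1) (j + 1) = mid ++ [cs[j + 1 + m]'hidx] := by
    rw [pvWin, List.take_add_one, List.getElem?_drop, List.getElem?_eq_getElem hidx]
    simp [hmid]
  have hgd : cs.getD (j + (m + 1)) 'x' = cs[j + 1 + m]'hidx := by
    have he : j + (m + 1) = j + 1 + m := by omega
    rw [he]
    simp [List.getD, List.getElem?_eq_getElem hidx]
  have hmask : pvVal (pvWin cs (m + 1) j) &&& (2 ^ m - 1) = pvVal mid := by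
    have hvlt : pvVal mid < 2 ^ m := hmidlen ▸ pvVal_lt hmidbin
    rw [Nat.and_two_pow_sub_one_eq_mod, hwj, pvVal_cons, hmidlen,
      mul_comm (pvDigit (cs[j]'hjl)) ((2:Nat) ^ m), Nat.mul_add_mod, Nat.mod_eq_of_lt hvlt]
  rw [hmask, hgd, hwj1, pvVal_append_singleton]

-- marking: membership view of the seen array
def pvMark (base : List Bool) (vs : List Nat) : List Bool :=
  vs.foldl (fun sn v => sn.set v true) base

lemma pvMark_length (base : List Bool) (vs : List Nat) :
    (pvMark base vs).length = base.length := by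
  induction vs generalizing base with
  | nil => rfl
  | cons v t ih => simpa [pvMark] using ih (base.set v true)

lemma pvMark_cons (base : List Bool) (v : Nat) (t : List Nat) :
    pvMark base (v :: t) = pvMark (base.set v true) t := rfl

lemma pvMark_append_singleton (base : List Bool) (l : List Nat) (v : Nat) :
    pvMark base (l ++ [v]) = (pvMark base l).set v true := by
  simp [pvMark, List.foldl_append]

lemma pvMark_get (base : List Bool) (vs : List Nat) (j : Nat) (hj : j < base.length) :
    (pvMark base vs)[j]? = some (base[j] || decide (j ∈ vs)) := by
  induction vs generalizing base with
  | nil => simp [pvMark, List.getElem?_eq_getElem hj]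
  | cons v t ih =>
    rw [pvMark_cons, ih (base.set v true) (by simpa)]
    by_cases hv : v = j
    · subst hv
      simp
    · have hvj : ¬ j = v := fun h => hv h.symm
      simp [hv, hvj]

-- the seen-scan of A is the full-coverage test
lemma pvSeen (n : Nat) (vs : List Nat) :
    (pvMark (List.replicate n false) vs).all (fun v => v)
      = decide (∀ j < n, j ∈ vs) := by
  have hlen : (pvMark (List.replicate n false) vs).length = n := by
    rw [pvMark_length, List.length_replicate]
  have key : ∀ j, (hj : j < n) →
      (pvMark (List.replicate n false) vs)[j]'(by omega) = decide (j ∈ vs) := by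
    intro j hj
    have h3 := pvMark_get (List.replicate n false) vs j (by simpa)
    rw [List.getElem?_eq_getElem (by omega)] at h3
    have h4 := Option.some.inj h3
    simpa using h4
  rw [Bool.eq_iff_iff, List.all_eq_true, List.forall_mem_iff_getElem]
  simp only [decide_eq_true_eq]
  constructor
  · intro h j hj
    have h5 := h j (by omega)
    rw [key j hj] at h5
    simpa using h5
  · intro h i hi
    have hi' : i < n := by omega
    rw [key i hi']
    simp [h i hi']

-- A's second loop keeps the invariant (current window value, marks of all windows so far)
lemma pvLoop (cs : List Char) (kn : Nat) (hb : pvBin cs) (hk : 1 ≤ kn)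
    (hkl : kn ≤ cs.length) (m : Nat) (hm : m ≤ cs.length - kn) :
    (List.range m).foldl
      (fun (st : Nat × List Bool) j =>
        (2 * (st.1 &&& ((2 ^ kn - 1) - 2 ^ (kn - 1))) + pvDigit (cs.getD (j + 1 + kn - 1) 'x'),
         st.2.set (2 * (st.1 &&& ((2 ^ kn - 1) - 2 ^ (kn - 1))) + pvDigit (cs.getD (j + 1 + kn - 1) 'x')) true))
      (pvVal (pvWin cs kn 0), pvMark (List.replicate (2 ^ kn) false) [pvVal (pvWin cs kn 0)])
    = (pvVal (pvWin cs kn m),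
       pvMark (List.replicate (2 ^ kn) false)
         ((List.range (m + 1)).map (fun i => pvVal (pvWin cs kn i)))) := by
  induction m with
  | zero => simp
  | succ m ih =>
    rw [List.range_succ, List.foldl_append, ih (by omega)]
    simp only [List.foldl_cons, List.foldl_nil]
    rw [pvMask kn hk]
    have hidx : m + 1 + kn - 1 = m + kn := by omega
    have hstep := pvRoll cs kn m hb hk (by omega)
    rw [hidx, hstep]
    simp only [Prod.mk.injEq, true_and]
    rw [List.range_succ (n := m + 1), List.map_append]
    simp only [List.map_cons, List.map_nil]
    rw [pvMark_append_singleton]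

-- counting: marking covers all of [0, n) iff the set of marked values has exactly n elements
lemma pvCount (n : Nat) (V : List Nat) (hsub : ∀ v ∈ V, v < n) :
    (∀ j < n, j ∈ V) ↔ V.toFinset.card = n := by
  have hsub' : V.toFinset ⊆ Finset.range n := by
    intro x hx
    rw [List.mem_toFinset] at hx
    rw [Finset.mem_range]
    exact hsub x hx
  constructor
  · intro h
    have heq : V.toFinset = Finset.range n := by
      apply Finset.Subset.antisymm hsub'
      intro j hj
      rw [List.mem_toFinset]
      exact h j (Finset.mem_range.mp hj)
    rw [heq, Finset.card_range]
  · intro h j hj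
    have heq : V.toFinset = Finset.range n :=
      Finset.eq_of_subset_of_card_le hsub' (by rw [h, Finset.card_range])
    rw [← List.mem_toFinset, heq]
    exact Finset.mem_range.mpr hj

-- B's inner loop computes the same code value as pvVal, over Int
lemma pvValI_aux : ∀ (w : List Char), pvBin w → ∀ (a : Nat),
    w.foldl (fun code c => 2 * code + pvDigitI c) ((a : Nat) : Int)
      = ((w.foldl (fun x c => 2 * x + pvDigit c) a : Nat) : Int) := by
  intro w
  induction w with
  | nil => intro _ a; simp
  | cons c t ih =>
    intro hb a
    have hc : c = '0' ∨ c = '1' := hb c (by simp)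
    have hdc : pvDigitI c = (pvDigit c : Int) := by
      rcases hc with h | h <;> subst h <;> decide
    simp only [List.foldl_cons, hdc]
    have h2 : (2 : Int) * ((a : Nat) : Int) + (pvDigit c : Int) = ((2 * a + pvDigit c : Nat) : Int) := by
      push_cast
      ring
    rw [h2, ih (fun x hx => hb x (by simp [hx]))]

lemma pvValI_eq {w : List Char} (hb : pvBin w) :
    w.foldl (fun code c => 2 * code + pvDigitI c) 0 = (pvVal w : Int) := by
  have h := pvValI_aux w hb 0
  simpa [pvVal] using h

-- B's fold builds the set of the window code values
lemma pvCodes (cs : List Char) (kn : Nat) (hb : pvBin cs) :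
    (List.range (cs.length - kn + 1)).foldl
      (fun codes (i : Nat) =>
        PySem.Set.add codes
          ((PySem.List.slice cs (some (i : Int)) (some ((i : Int) + (kn : Int)))).foldl
            (fun code c => 2 * code + pvDigitI c) 0))
      PySem.Set.empty
    = PySem.Set.ofList (((List.range (cs.length - kn + 1)).map (fun i => pvWin cs kn i)).map
        (fun w => (pvVal w : Int))) := by
  rw [← PySem.Set.update_map_eq_foldl_add (List.range (cs.length - kn + 1))
        (fun i : Nat => (PySem.List.slice cs (some (i : Int)) (some ((i : Int) + (kn : Int)))).foldl
            (fun code c => 2 * code + pvDigitI c) 0)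
        PySem.Set.empty]
  rw [show (PySem.Set.empty : PySem.Set Int) = [] from rfl, PySem.Set.update_nil_left]
  congr 1
  rw [List.map_map]
  apply List.map_congr_left
  intro i _
  rw [PySem.List.slice_natCast_add cs i kn]
  exact pvValI_eq (pvWin_bin cs kn i hb)

lemma pvOfList_card_int (l : List Int) :
    (PySem.Set.ofList l).length = l.toFinset.card := by
  rw [← List.toFinset_card_of_nodup (PySem.Set.nodup_ofList l)]
  congr 1
  ext x
  simp [PySem.Set.mem_ofList]

-- main case: k ≥ 1, binary string, k ≤ len(s)
lemma pvMain (s : String) (k : Int) (hb : pvBin s.toList) (hk1 : 1 ≤ k)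
    (hkl : k ≤ (s.toList.length : Int)) : hasAllCodes s k = hasAllCodes_alt s k := by
  obtain ⟨kn, rfl⟩ : ∃ kn : Nat, k = (kn : Int) := ⟨k.toNat, by omega⟩
  have hk : 1 ≤ kn := by exact_mod_cast hk1
  have hklt : kn ≤ s.toList.length := by exact_mod_cast hkl
  have hgt : ¬ ((kn : Int) > (s.toList.length : Int)) := by
    simp only [gt_iff_lt, not_lt]
    exact_mod_cast hklt
  simp only [hasAllCodes, hasAllCodes_alt, Int.toNat_natCast, if_neg hgt]
  set cs := s.toList with hcs
  rw [pvFirst cs kn hklt]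
  have htk0 : cs.take kn = pvWin cs kn 0 := by simp [pvWin]
  rw [htk0]
  rw [show (List.replicate (2 ^ kn) false).set (pvVal (pvWin cs kn 0)) true
      = pvMark (List.replicate (2 ^ kn) false) [pvVal (pvWin cs kn 0)] from rfl]
  rw [pvLoop cs kn hb hk hklt (cs.length - kn) le_rfl]
  rw [pvSeen, if_neg (show ¬ ((kn : Int) < 0) by omega),
    show ((cs.length : Int) - (kn : Int) + 1).toNat = cs.length - kn + 1 from by omega,
    pvCodes cs kn hb, pvOfList_card_int]
  rw [Bool.eq_iff_iff, beq_iff_eq, decide_eq_true_eq]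
  have hcast : ((2 : Int) ^ kn) = ((2 ^ kn : Nat) : Int) := by
    push_cast
    ring
  rw [hcast, Int.natCast_inj]
  set W := (List.range (cs.length - kn + 1)).map (fun i => pvWin cs kn i) with hW
  have hmm : (W.map (fun w => (pvVal w : Int))).toFinset.card = (W.map pvVal).toFinset.card := by
    rw [show (W.map (fun w => (pvVal w : Int))) = (W.map pvVal).map (fun n : Nat => (n : Int)) from by
          simp [hW, List.map_map, Function.comp]]
    rw [show ((W.map pvVal).map (fun n : Nat => (n : Int))).toFinset
          = (W.map pvVal).toFinset.image (fun n : Nat => (n : Int)) from by ext x; simp]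
    rw [Finset.card_image_of_injective _ Nat.cast_injective]
  rw [hmm]
  have hsub : ∀ v ∈ W.map pvVal, v < 2 ^ kn := by
    intro v hv
    obtain ⟨w, hw, rfl⟩ := List.mem_map.mp hv
    rw [hW] at hw
    obtain ⟨i, hi, rfl⟩ := List.mem_map.mp hw
    rw [List.mem_range] at hi
    have hlt := pvVal_lt (pvWin_bin cs kn i hb)
    rwa [pvWin_len cs kn i (by omega)] at hlt
  have hcnt := pvCount (2 ^ kn) (W.map pvVal) hsub
  have hmaps : W.map pvVal
      = (List.range (cs.length - kn + 1)).map (fun i => pvVal (pvWin cs kn i)) := by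
    rw [hW, List.map_map]
    rfl
  rw [← hmaps]
  exact hcnt

-- ===== VERDICT (by name: the statement is the Claim_ definition above) =====
theorem hasAllCodes_spec : Claim_equal_hasAllCodes := by
  intro s k _ hpre
  unfold Spec_hasAllCodes
  by_cases hgt : k > (s.toList.length : Int)
  · simp only [hasAllCodes, hasAllCodes_alt]
    rw [if_pos hgt, if_pos hgt]
  · rcases hpre with h | ⟨hk, hb⟩ | ⟨hk, hs⟩
    · omega
    · have hb' : pvBin s.toList := fun c hc => by
        have h2 := List.all_eq_true.mp hb c hc
        simp only [Bool.or_eq_true, beq_iff_eq] at h2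
        exact h2
      exact pvMain s k hb' hk (by omega)
    · subst hk hs
      decide
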